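-- pv_equiv track=rewrite | github.com/CyberPunkYu/CQU_CS_LAB | 资料/py/pylearn/C8_Functions/falsecoin.py | findFalseCoin
-- ===== SOURCE A (Python) =====
-- from math import floor
--
-- def findFalseCoin(coins,start,n):
--     "在coins列表中下标start开始的n个硬币中查找假硬币"
--     if n==1:
--         return start      #查找范围里只剩下一枚硬币，直接返回其下标
--     nHalf = floor(n/2.0)  #nHalf为硬币数量的一半，下取整
--     wL = sum(coins[start:start+nHalf])   #左:start下标开始的nHalf枚硬币的总重量
--     wR = sum(coins[start+nHalf:start+nHalf+nHalf]) #右:另外nHalf枚硬币的总重量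
--     if wL < wR:       #左轻，假硬币在start下标开始的nHalf枚硬币里
--         return findFalseCoin(coins,start,nHalf)
--     elif wR < wL: 	  #右轻，假硬币在start+nHalf下标开始的nHalf枚硬币里
--         return findFalseCoin(coins,start+nHalf,nHalf)
--     elif nHalf*2 < n: #左右相等，且剩余一枚硬币未上天平，剩余那枚硬币为假
--         return start + n - 1
--     else:             #左右相等，且没有剩余硬币，未找到假硬币
--         return None
-- ===== SOURCE B (Python) =====
-- def findFalseCoin(coins, start, n):
--     "在coins列表中下标start开始的n个硬币中查找假硬币"
--     L = len(coins)
--     # stage 1: prefix sums, computed once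
--     pref = [0]
--     for c in coins:
--         pref.append(pref[-1] + c)
--
--     def cut(i):
--         "slice-index adjustment: negative indices count from the end, then clamp"
--         if i < 0:
--             i += L
--         return min(max(i, 0), L)
--
--     def weigh(i, j):
--         "sum(coins[i:j]) in O(1) from the prefix table"
--         a, b = cut(i), cut(j)
--         return pref[b] - pref[a] if b > a else 0
--
--     # stage 2: the halving schedule of window sizes, down to 1
--     sizes = []
--     m = n
--     while m > 1:
--         sizes.append(m)
--         m //= 2
--     # stage 3: descend the schedule with O(1) weighings
--     lo = start
--     for m in sizes:
--         h = m // 2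
--         wL = weigh(lo, lo + h)
--         wR = weigh(lo + h, lo + 2 * h)
--         if wL < wR:               # left pan lighter
--             pass
--         elif wR < wL:             # right pan lighter
--             lo += h
--         elif m % 2 == 1:          # pans balance, one coin stayed off the scale
--             return lo + m - 1
--         else:                     # pans balance, nothing left over
--             return None
--     return lo
-- ===== Notes on version B (the rewrite author's own statement) =====
-- stated objective: alternative
-- what changed: Replaces the recursive halving that re-sums both slices at every level by three staged passes: one prefix-sum table with slice-style clamped O(1) lookups, a precomputed halving schedule of window sizes, and an iterative descent of that schedule; asymptotically fewer additions but not measurably faster in CPython, where A's slice summing runs in C.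
-- outside the precondition, e.g. on findFalseCoin([1, 2], 0, 0): A returns None, B returns 0; on findFalseCoin([5, 1], 0, -1): A returns -3, B returns 0; on findFalseCoin([-1, 9], 0, -1): A raises RecursionError, B returns 0
import Mathlib
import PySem

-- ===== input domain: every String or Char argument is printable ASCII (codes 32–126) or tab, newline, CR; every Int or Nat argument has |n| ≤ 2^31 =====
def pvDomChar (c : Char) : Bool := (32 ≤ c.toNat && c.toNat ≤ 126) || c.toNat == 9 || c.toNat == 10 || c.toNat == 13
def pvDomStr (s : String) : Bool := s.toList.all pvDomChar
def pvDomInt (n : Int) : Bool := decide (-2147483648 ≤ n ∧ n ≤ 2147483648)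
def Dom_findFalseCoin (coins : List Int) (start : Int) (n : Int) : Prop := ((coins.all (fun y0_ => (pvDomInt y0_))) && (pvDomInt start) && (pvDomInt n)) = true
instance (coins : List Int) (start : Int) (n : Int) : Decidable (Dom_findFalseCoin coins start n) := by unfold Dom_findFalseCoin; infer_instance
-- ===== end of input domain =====

-- B replaces A's recursive halving with re-summed slices by three staged passes
-- (prefix-sum table with clamped O(1) lookups, precomputed halving schedule, descent);
-- objective: alternative (a different algorithm of similar measured cost).

-- ===== PORT A =====
-- Python A recurses on n; the fuel n.toNat+64 only makes the recursion total in Lean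
-- (each step floor-halves n, so wherever Python returns the depth is well below it).
-- floor(n/2.0) is exact integer floor division for |n| ≤ 2^31, ported as PySem.Int.floordiv.
def findFalseCoinFuel (coins : List Int) : Nat → Int → Int → Option Int
  | 0, _, _ => none
  | fuel+1, start, n =>
    if n = 1 then some start
    else
      let nHalf := PySem.Int.floordiv n 2
      let wL := (PySem.List.slice coins (some start) (some (start + nHalf))).sum
      let wR := (PySem.List.slice coins (some (start + nHalf)) (some (start + nHalf + nHalf))).sum
      if wL < wR then findFalseCoinFuel coins fuel start nHalf
      else if wR < wL then findFalseCoinFuel coins fuel (start + nHalf) nHalf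
      else if nHalf * 2 < n then some (start + n - 1)
      else none

def findFalseCoin (coins : List Int) (start : Int) (n : Int) : Option Int :=
  findFalseCoinFuel coins (n.toNat + 64) start n

-- ===== PORT B =====
-- Stage 1 of Source B: pref = [0]; for c in coins: pref.append(pref[-1] + c);
-- pref[-1] is PySem.List.pyGetD pref (-1).
def buildPref (coins : List Int) : List Int :=
  coins.foldl (fun pref c => pref ++ [PySem.List.pyGetD pref (-1) 0 + c]) [0]

-- Source B's cut: slice-index adjustment (negative counts from the end, then clamp to [0,L]).
def cutIdx (L i : Int) : Int :=
  min (max (if i < 0 then i + L else i) 0) L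

-- Source B's weigh: sum(coins[i:j]) as a prefix difference; indices produced by cutIdx
-- lie in [0, L] where pyGetD on pref (length L+1) is exact.
def weigh (pref : List Int) (L i j : Int) : Int :=
  let a := cutIdx L i
  let b := cutIdx L j
  if b > a then PySem.List.pyGetD pref b 0 - PySem.List.pyGetD pref a 0 else 0

-- Stage 2 of Source B: the while loop collecting window sizes [n, n//2, ...] down to 1;
-- fuel m.toNat+1 only makes it total (each step halves m, so it is never exhausted).
def halveSizes : Nat → Int → List Int
  | 0, _ => []
  | fuel+1, m =>
    if m > 1 then m :: halveSizes fuel (PySem.Int.floordiv m 2) else []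

-- Stage 3 of Source B: the for loop over the schedule.
def descend (pref : List Int) (L : Int) : List Int → Int → Option Int
  | [], lo => some lo
  | m :: rest, lo =>
    let h := PySem.Int.floordiv m 2
    let wL := weigh pref L lo (lo + h)
    let wR := weigh pref L (lo + h) (lo + 2 * h)
    if wL < wR then descend pref L rest lo
    else if wR < wL then descend pref L rest (lo + h)
    else if PySem.Int.mod m 2 = 1 then some (lo + m - 1)
    else none

def findFalseCoin_alt (coins : List Int) (start : Int) (n : Int) : Option Int :=
  descend (buildPref coins) (coins.length : Int) (halveSizes (n.toNat + 1) n) start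

-- ===== PRECONDITION & SPEC =====
-- Pre_ requires a positive number n of coins to search; it excludes n ≤ 0, where A's
-- mixed results (None, or negative pseudo-indices produced by halving a non-positive
-- count, and on some inputs infinite recursion) are accidents of the implementation.
def Pre_findFalseCoin (coins : List Int) (start : Int) (n : Int) : Prop := 1 ≤ n
instance (coins : List Int) (start : Int) (n : Int) : Decidable (Pre_findFalseCoin coins start n) := by unfold Pre_findFalseCoin; infer_instance

def pvWitness_findFalseCoin : List Int × Int × Int := ([3, 3, 2, 3], 0, 4)

def Spec_findFalseCoin (coins : List Int) (start : Int) (n : Int) (out : Option Int) : Prop := out = findFalseCoin_alt coins start n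
instance (coins : List Int) (start : Int) (n : Int) (out : Option Int) : Decidable (Spec_findFalseCoin coins start n out) := by unfold Spec_findFalseCoin; infer_instance

-- ===== CLAIM (what is proved, stated in full; the proofs are below) =====
def Claim_equal_findFalseCoin : Prop := ∀ (coins : List Int) (start : Int) (n : Int), Dom_findFalseCoin coins start n → Pre_findFalseCoin coins start n → Spec_findFalseCoin coins start n (findFalseCoin coins start n)

-- ===== LEMMAS AND PROOFS =====

-- Source B's appending loop builds exactly the scanl of running sums.
theorem buildPref_aux : ∀ (l acc : List Int) (a : Int),
    l.foldl (fun pref c => pref ++ [PySem.List.pyGetD pref (-1) 0 + c]) (acc ++ [a])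
      = acc ++ List.scanl (· + ·) a l := by
  intro l
  induction l with
  | nil => intro acc a; simp [List.scanl]
  | cons x xs ih =>
      intro acc a
      rw [List.foldl_cons, PySem.List.pyGetD_neg_one_append_singleton,
        List.append_assoc]
      have := ih (acc ++ [a]) (a + x)
      simpa [List.append_assoc] using this

theorem buildPref_eq (coins : List Int) :
    buildPref coins = List.scanl (· + ·) 0 coins := by
  have := buildPref_aux coins [] 0
  simpa [buildPref] using this

-- pref[i] is the sum of the first i coins (general init for the induction).
theorem scanl_getD_sum (l : List Int) : ∀ (a : Int) (i : Nat), i ≤ l.length →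
    (List.scanl (· + ·) a l).getD i 0 = a + (l.take i).sum := by
  induction l with
  | nil =>
      intro a i hi
      have hz : i = 0 := by simpa using hi
      subst hz
      simp [List.scanl_nil]
  | cons x xs ih =>
      intro a i hi
      cases i with
      | zero => simp [List.scanl_cons]
      | succ j =>
          rw [List.scanl_cons, List.getD_cons_succ, ih (a + x) j (by simpa using hi),
            List.take_succ_cons, List.sum_cons]
          ring

theorem pyGetD_scanl_nat (coins : List Int) (i : Nat) (h1 : i ≤ coins.length) :
    PySem.List.pyGetD (List.scanl (· + ·) 0 coins) ((i : Nat) : Int) 0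
      = (coins.take i).sum := by
  rw [PySem.List.pyGetD_natCast, scanl_getD_sum coins 0 i h1]
  ring

theorem sum_drop_take (l : List Int) (a b : Nat) (hab : a ≤ b) :
    ((l.drop a).take (b - a)).sum = (l.take b).sum - (l.take a).sum := by
  have h1 : (l.take b).drop a = (l.drop a).take (b - a) := List.drop_take ..
  have h2 : ((l.take b).take a).sum + ((l.take b).drop a).sum = (l.take b).sum :=
    List.sum_take_add_sum_drop _ _
  rw [List.take_take, min_eq_left hab, h1] at h2
  omega

-- Source B's Int-valued cut agrees with the Nat-valued clamp inside PySem's slice.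
theorem cutIdx_eq_clampIdx (L : Nat) (i : Int) :
    cutIdx (L : Int) i = ((PySem.List.clampIdx L i : Nat) : Int) := by
  unfold cutIdx PySem.List.clampIdx
  split_ifs <;> omega

-- A's slice weighing equals B's clamped prefix-sum lookup, for ANY Int bounds.
theorem slice_sum_eq_weigh (coins : List Int) (i j : Int) :
    (PySem.List.slice coins (some i) (some j)).sum
      = weigh (List.scanl (· + ·) 0 coins) (coins.length : Int) i j := by
  simp only [PySem.List.slice, weigh]
  rw [cutIdx_eq_clampIdx, cutIdx_eq_clampIdx]
  set A := PySem.List.clampIdx coins.length i with hA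
  set B := PySem.List.clampIdx coins.length j with hB
  have hAle : A ≤ coins.length := by
    rw [hA]; unfold PySem.List.clampIdx; split_ifs <;> omega
  have hBle : B ≤ coins.length := by
    rw [hB]; unfold PySem.List.clampIdx; split_ifs <;> omega
  by_cases hle : B ≤ A
  · rw [if_neg (by exact_mod_cast by omega)]
    have : B - A = 0 := by omega
    simp [this]
  · rw [if_pos (by exact_mod_cast by omega : ((B : Nat) : Int) > ((A : Nat) : Int))]
    rw [pyGetD_scanl_nat coins B hBle, pyGetD_scanl_nat coins A hAle]
    exact sum_drop_take coins A B (by omega)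

-- halveSizes ignores the exact fuel once it exceeds the recursion depth.
theorem halveSizes_fuel : ∀ (f1 f2 : Nat) (n : Int), n.toNat < f1 → n.toNat < f2 →
    halveSizes f1 n = halveSizes f2 n := by
  intro f1
  induction f1 with
  | zero => intro f2 n h1 _; omega
  | succ f1 ih =>
      intro f2 n h1 h2
      by_cases hn : n > 1
      · cases f2 with
        | zero => omega
        | succ f2 =>
            rw [halveSizes, halveSizes, if_pos hn, if_pos hn]
            have hfd : PySem.Int.floordiv n 2 = n / 2 :=
              PySem.Int.floordiv_eq_ediv_of_pos (by omega)
            rw [ih f2 (PySem.Int.floordiv n 2) (by omega) (by omega)]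
      · cases f2 with
        | zero => omega
        | succ f2 => rw [halveSizes, halveSizes, if_neg hn, if_neg hn]

theorem main_eq (coins : List Int) : ∀ (fuel : Nat) (start n : Int),
    1 ≤ n → n.toNat < fuel →
    findFalseCoinFuel coins fuel start n
      = descend (List.scanl (· + ·) 0 coins) (coins.length : Int) (halveSizes fuel n) start := by
  intro fuel
  induction fuel with
  | zero => intro start n hn hf; omega
  | succ fuel ih =>
      intro start n hn hf
      by_cases h1 : n = 1
      · subst h1; simp [findFalseCoinFuel, halveSizes, descend]
      · have hn2 : 2 ≤ n := by omega
        rw [findFalseCoinFuel, halveSizes, if_pos (by omega : n > 1), descend]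
        simp only [if_neg h1]
        have hfd : PySem.Int.floordiv n 2 = n / 2 :=
          PySem.Int.floordiv_eq_ediv_of_pos (by omega)
        set h := PySem.Int.floordiv n 2 with hh
        have hdef : h = n / 2 := hfd
        have hh1 : 1 ≤ h := by omega
        have htt : start + h + h = start + 2 * h := by ring
        rw [htt, slice_sum_eq_weigh coins start (start + h),
          slice_sum_eq_weigh coins (start + h) (start + 2 * h)]
        have hmod : PySem.Int.mod n 2 = n % 2 :=
          PySem.Int.mod_eq_emod_of_pos (by omega)
        set wL := weigh (List.scanl (· + ·) 0 coins) (coins.length : Int) start (start + h)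
        set wR := weigh (List.scanl (· + ·) 0 coins) (coins.length : Int) (start + h) (start + 2 * h)
        by_cases hc1 : wL < wR
        · rw [if_pos hc1, if_pos hc1]
          exact ih start h hh1 (by omega)
        · rw [if_neg hc1, if_neg hc1]
          by_cases hc2 : wR < wL
          · rw [if_pos hc2, if_pos hc2]
            exact ih (start + h) h hh1 (by omega)
          · rw [if_neg hc2, if_neg hc2]
            by_cases hc3 : h * 2 < n
            · rw [if_pos hc3, if_pos (by rw [hmod]; omega)]
            · rw [if_neg hc3, if_neg (by rw [hmod]; omega)]

-- ===== VERDICT (by name: the statement is the Claim_ definition above) =====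
theorem findFalseCoin_spec : Claim_equal_findFalseCoin := by
  intro coins start n _ hpre
  unfold Spec_findFalseCoin findFalseCoin findFalseCoin_alt
  rw [buildPref_eq]
  rw [halveSizes_fuel (n.toNat + 1) (n.toNat + 64) n (by omega) (by omega)]
  exact main_eq coins (n.toNat + 64) start n hpre (by omega)
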